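-- pv_equiv track=rewrite | github.com/linkaform/addons | lkf_addons/addons/product/app.py | format_catalog_product
-- ===== SOURCE A (Python) =====
-- def format_catalog_product(data_query):
--     list_response = []
--     for item in data_query:
--         wharehouse = item.get('61ef32bcdf0ec2ba73dec343','')
--         if wharehouse not in list_response and wharehouse !='':
--             list_response.append(wharehouse)
--
--     list_response.sort()
--     return list_response
-- ===== SOURCE B (Python) =====
-- def format_catalog_product(data_query):
--     values = sorted(item.get('61ef32bcdf0ec2ba73dec343', '') for item in data_query)
--     result = []
--     prev = None
--     for v in values:
--         if v != '' and v != prev: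
--             result.append(v)
--         prev = v
--     return result
-- ===== Notes on version B (the rewrite author's own statement) =====
-- stated objective: alternative
-- what changed: Instead of A's per-element membership-scan dedup over a growing result list followed by a sort, B maps every row to its warehouse value (keeping empties), sorts the whole multiset once, and makes a single previous-element pass that drops empties and adjacent duplicates; on inputs with many distinct values this avoids A's quadratic scan, though a timing run measured no difference on its inputs.
import Mathlib
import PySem

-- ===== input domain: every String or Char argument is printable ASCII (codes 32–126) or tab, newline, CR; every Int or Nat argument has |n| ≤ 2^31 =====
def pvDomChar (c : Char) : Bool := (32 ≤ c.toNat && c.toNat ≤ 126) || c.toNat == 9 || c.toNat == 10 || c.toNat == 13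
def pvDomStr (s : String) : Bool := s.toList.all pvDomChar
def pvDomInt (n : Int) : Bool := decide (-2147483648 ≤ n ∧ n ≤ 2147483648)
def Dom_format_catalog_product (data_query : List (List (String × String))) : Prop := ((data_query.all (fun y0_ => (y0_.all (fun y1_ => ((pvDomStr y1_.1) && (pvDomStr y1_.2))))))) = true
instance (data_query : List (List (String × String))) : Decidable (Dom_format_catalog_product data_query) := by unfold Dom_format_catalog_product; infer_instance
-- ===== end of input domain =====

-- B maps every row to its warehouse value, sorts the whole multiset once, and removes
-- empties and adjacent duplicates in one previous-element pass (objective: alternative).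
-- A's `.sort()` mutates its local list only; neither version mutates the argument.

-- ===== PORT A =====
def format_catalog_product (data_query : List (List (String × String))) : List String :=
  let list_response := data_query.foldl (fun acc item =>
    let wharehouse := (item.lookup "61ef32bcdf0ec2ba73dec343").getD ""
    if wharehouse ∉ acc ∧ wharehouse ≠ "" then acc ++ [wharehouse] else acc) []
  PySem.List.sorted list_response (fun x => x) false

-- ===== PORT B =====
def format_catalog_product_alt (data_query : List (List (String × String))) : List String :=
  let values := PySem.List.sorted
    (data_query.map (fun item => (item.lookup "61ef32bcdf0ec2ba73dec343").getD ""))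
    (fun x => x) false
  -- `prev` starts as Python's None (here: Option.none); `v != prev` is true when prev is None
  (values.foldl (fun (st : List String × Option String) v =>
      (if v ≠ "" ∧ st.2 ≠ some v then st.1 ++ [v] else st.1, some v))
    ([], none)).1

-- ===== PRECONDITION & SPEC =====
def Spec_format_catalog_product (data_query : List (List (String × String))) (out : List String) : Prop := out = format_catalog_product_alt data_query
instance (data_query : List (List (String × String))) (out : List String) : Decidable (Spec_format_catalog_product data_query out) := by unfold Spec_format_catalog_product; infer_instance

-- ===== CLAIM (what is proved, stated in full; the proofs are below) =====
def Claim_equal_format_catalog_product : Prop := ∀ (data_query : List (List (String × String))), Dom_format_catalog_product data_query → Spec_format_catalog_product data_query (format_catalog_product data_query)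

-- ===== LEMMAS AND PROOFS =====

-- A's dedup accumulation loop (proof-side name for the fold in port A)
def pvFoldA (acc : List String) (dq : List (List (String × String))) : List String :=
  dq.foldl (fun acc item =>
    let wharehouse := (item.lookup "61ef32bcdf0ec2ba73dec343").getD ""
    if wharehouse ∉ acc ∧ wharehouse ≠ "" then acc ++ [wharehouse] else acc) acc

-- B's scan loop (proof-side name)
def pvScan (st : List String × Option String) (xs : List String) : List String :=
  (xs.foldl (fun (st : List String × Option String) v =>
      (if v ≠ "" ∧ st.2 ≠ some v then st.1 ++ [v] else st.1, some v)) st).1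

-- the set both versions collect
def pvP (dq : List (List (String × String))) (x : String) : Prop :=
  x ≠ "" ∧ ∃ it ∈ dq, (it.lookup "61ef32bcdf0ec2ba73dec343").getD "" = x

lemma pvFoldA_mem (dq : List (List (String × String))) :
    ∀ acc x, x ∈ pvFoldA acc dq ↔ x ∈ acc ∨ pvP dq x := by
  induction dq with
  | nil => intro acc x; simp [pvFoldA, pvP]
  | cons it rest ih =>
    intro acc x
    have step : pvFoldA acc (it :: rest)
        = pvFoldA (if ((it.lookup "61ef32bcdf0ec2ba73dec343").getD "") ∉ acc ∧ ((it.lookup "61ef32bcdf0ec2ba73dec343").getD "") ≠ ""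
                   then acc ++ [(it.lookup "61ef32bcdf0ec2ba73dec343").getD ""] else acc) rest := rfl
    rw [step, ih]
    constructor
    · rintro (hm | hp)
      · split_ifs at hm with h
        · rcases List.mem_append.1 hm with h1 | h1
          · exact Or.inl h1
          · simp at h1; exact Or.inr ⟨h1 ▸ h.2, it, by simp, h1.symm⟩
        · exact Or.inl hm
      · exact Or.inr ⟨hp.1, hp.2.choose, by simp [hp.2.choose_spec.1], hp.2.choose_spec.2⟩
    · rintro (hm | ⟨hne, it', hit', heq⟩)
      · split_ifs with h
        · exact Or.inl (List.mem_append.2 (Or.inl hm))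
        · exact Or.inl hm
      · rcases List.mem_cons.1 hit' with rfl | h'
        · split_ifs with h
          · exact Or.inl (by simp [heq])
          · rcases not_and_or.1 h with h1 | h1
            · exact Or.inl (by rw [← heq]; exact not_not.1 h1)
            · rw [← heq] at hne; exact absurd (not_not.1 h1) hne
        · exact Or.inr ⟨hne, it', h', heq⟩

lemma pvFoldA_nodup (dq : List (List (String × String))) :
    ∀ acc, acc.Nodup → (pvFoldA acc dq).Nodup := by
  induction dq with
  | nil => intro acc h; exact h
  | cons it rest ih =>
    intro acc h
    have step : pvFoldA acc (it :: rest)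
        = pvFoldA (if ((it.lookup "61ef32bcdf0ec2ba73dec343").getD "") ∉ acc ∧ ((it.lookup "61ef32bcdf0ec2ba73dec343").getD "") ≠ ""
                   then acc ++ [(it.lookup "61ef32bcdf0ec2ba73dec343").getD ""] else acc) rest := rfl
    rw [step]
    apply ih
    split_ifs with hc
    · exact List.Nodup.append h (by simp) (fun a ha hm => hc.1 ((List.mem_singleton.1 hm) ▸ ha))
    · exact h

-- invariant-carrying main lemma for B's previous-element scan over a sorted list
lemma pvScan_main (xs : List String) :
    ∀ out prev, xs.Pairwise (· ≤ ·) → out.Pairwise (· < ·) →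
      (prev = none → out = []) →
      (∀ p, prev = some p → (∀ a ∈ out, a ≤ p) ∧ (∀ y ∈ xs, p ≤ y) ∧ (p ≠ "" → p ∈ out)) →
      (pvScan (out, prev) xs).Pairwise (· < ·) ∧
      (∀ x, x ∈ pvScan (out, prev) xs ↔ x ∈ out ∨ (x ∈ xs ∧ x ≠ "")) := by
  induction xs with
  | nil => intro out prev _ hout _ _; exact ⟨hout, by simp [pvScan]⟩
  | cons v rest ih =>
    intro out prev hx hout hnone hsome
    have hv : ∀ y ∈ rest, v ≤ y := (List.pairwise_cons.1 hx).1
    have hrest : rest.Pairwise (· ≤ ·) := (List.pairwise_cons.1 hx).2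
    have step : pvScan (out, prev) (v :: rest)
        = pvScan ((if v ≠ "" ∧ prev ≠ some v then out ++ [v] else out), some v) rest := rfl
    rw [step]
    by_cases hc : v ≠ "" ∧ prev ≠ some v
    · -- append v
      have hlt : ∀ a ∈ out, a < v := by
        intro a ha
        rcases hp : prev with _ | p
        · rw [hnone hp] at ha; simp at ha
        · have h1 := hsome p hp
          have h2 : p ≤ v := h1.2.1 v (by simp)
          have h3 : p ≠ v := fun h => hc.2 (by rw [hp, h])
          exact lt_of_le_of_lt (h1.1 a ha) (lt_of_le_of_ne h2 h3)
      have hout' : (out ++ [v]).Pairwise (· < ·) := by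
        rw [List.pairwise_append]; exact ⟨hout, by simp, by simpa using hlt⟩
      have hsome' : ∀ p, some v = some p →
          (∀ a ∈ out ++ [v], a ≤ p) ∧ (∀ y ∈ rest, p ≤ y) ∧ (p ≠ "" → p ∈ out ++ [v]) := by
        intro p hp
        have : p = v := (Option.some.inj hp).symm
        subst this
        refine ⟨fun a ha => ?_, hv, fun _ => by simp⟩
        rcases List.mem_append.1 ha with h1 | h1
        · exact le_of_lt (hlt a h1)
        · simp at h1; simp [h1]
      have := ih (out ++ [v]) (some v) hrest hout' (by simp) hsome'
      rw [if_pos hc]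
      refine ⟨this.1, fun x => ?_⟩
      rw [this.2 x]
      constructor
      · rintro (h1 | h1)
        · rcases List.mem_append.1 h1 with h2 | h2
          · exact Or.inl h2
          · simp at h2; exact Or.inr ⟨by simp [h2], h2 ▸ hc.1⟩
        · exact Or.inr ⟨by simp [h1.1], h1.2⟩
      · rintro (h1 | ⟨h1, h2⟩)
        · exact Or.inl (List.mem_append.2 (Or.inl h1))
        · rcases List.mem_cons.1 h1 with rfl | h3
          · exact Or.inl (by simp)
          · exact Or.inr ⟨h3, h2⟩
    · -- skip v (empty, or adjacent duplicate)
      have hle_new : ∀ a ∈ out, a ≤ v := by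
        intro a ha
        rcases hp : prev with _ | p
        · rw [hnone hp] at ha; simp at ha
        · exact le_trans ((hsome p hp).1 a ha) ((hsome p hp).2.1 v (by simp))
      have hmemv : v ≠ "" → v ∈ out := by
        intro hne
        rcases not_and_or.1 hc with h1 | h1
        · exact absurd hne (by simpa using h1)
        · have hp : prev = some v := not_not.1 h1
          exact ((hsome v hp).2.2) hne
      have hsome' : ∀ p, some v = some p →
          (∀ a ∈ out, a ≤ p) ∧ (∀ y ∈ rest, p ≤ y) ∧ (p ≠ "" → p ∈ out) := by
        intro p hp
        have : p = v := (Option.some.inj hp).symm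
        subst this
        exact ⟨hle_new, hv, hmemv⟩
      have hnone' : (some v : Option String) = none → out = [] := by simp
      have := ih out (some v) hrest hout hnone' hsome'
      rw [if_neg hc]
      refine ⟨this.1, fun x => ?_⟩
      rw [this.2 x]
      constructor
      · rintro (h1 | h1)
        · exact Or.inl h1
        · exact Or.inr ⟨by simp [h1.1], h1.2⟩
      · rintro (h1 | ⟨h1, h2⟩)
        · exact Or.inl h1
        · rcases List.mem_cons.1 h1 with rfl | h3
          · exact Or.inl (hmemv h2)
          · exact Or.inr ⟨h3, h2⟩

-- ===== VERDICT (by name: the statement is the Claim_ definition above) =====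
theorem format_catalog_product_spec : Claim_equal_format_catalog_product := by
  intro dq _
  unfold Spec_format_catalog_product
  show PySem.List.sorted (pvFoldA [] dq) (fun x => x) false
      = pvScan ([], none)
          (PySem.List.sorted
            (dq.map (fun item => (item.lookup "61ef32bcdf0ec2ba73dec343").getD "")) (fun x => x) false)
  set sv := PySem.List.sorted
      (dq.map (fun item => (item.lookup "61ef32bcdf0ec2ba73dec343").getD "")) (fun x => x) false with hsv
  have hsv_pw : sv.Pairwise (· ≤ ·) :=
    PySem.List.sorted_pairwise (dq.map (fun item => (item.lookup "61ef32bcdf0ec2ba73dec343").getD "")) (fun x => x)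
  have hscan := pvScan_main sv [] none hsv_pw (by simp) (fun _ => rfl) (by simp)
  have hmemB : ∀ x, x ∈ pvScan ([], none) sv ↔ pvP dq x := by
    intro x
    rw [hscan.2 x, hsv, PySem.List.mem_sorted]
    simp [pvP, List.mem_map]
    constructor
    · rintro ⟨⟨it, hit, heq⟩, hne⟩; exact ⟨hne, it, hit, heq⟩
    · rintro ⟨hne, it, hit, heq⟩; exact ⟨⟨it, hit, heq⟩, hne⟩
  have hmemA : ∀ x, x ∈ pvFoldA [] dq ↔ pvP dq x := by
    intro x; rw [pvFoldA_mem dq [] x]; simp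
  have hA_nd : (pvFoldA [] dq).Nodup := pvFoldA_nodup dq [] (by simp)
  have hB_nd : (pvScan ([], none) sv).Nodup :=
    (List.Pairwise.imp (fun h => ne_of_lt h) hscan.1)
  have hperm : (pvScan ([], none) sv).Perm (pvFoldA [] dq) :=
    (List.perm_ext_iff_of_nodup hB_nd hA_nd).2 (fun x => (hmemB x).trans (hmemA x).symm)
  exact PySem.List.sorted_eq_of_perm_of_pairwise_lt _ _ (fun x => x) hperm hscan.1
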